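-- pv_equiv track=rewrite | github.com/danielgrimland/Sea_Urchin_Endomesoderm_GRN | Code/FZST Experiment Generator.py | Create_Experiment_Timestamp_Lines
-- ===== SOURCE A (Python) =====
-- def Create_Experiment_Timestamp_Lines(timestamp_list, experiment_num, timestamp_num):
--     constraints = timestamp_list[experiment_num][timestamp_num]
--
--     if (len(constraints) == 0):
--         return ""
--
--     none_counter = 0
--     for e in constraints:
--         if (e == None):
--             none_counter += 1
--
--     restriction = f"$Restriction_{experiment_num + 1}_{timestamp_num + 1} :=\n" + "{\n\n"
--
--     if (len(constraints) != 1):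
--         for i in range(len(constraints) - 1):
--             if (constraints[i] != None):
--                 restriction += f"   {constraints[i][0]} = {constraints[i][1]} and\n"
--
--     if (constraints[-1] != None):
--         restriction += f"   {constraints[-1][0]} = {constraints[-1][1]}" + "\n\n};\n\n"
--     else:
--         if (none_counter != len(constraints)):
--             restriction = restriction[:-5] + "\n\n};\n\n"
--         else:
--             restriction += "\n\n};\n\n"
--
--     return restriction
-- ===== SOURCE B (Python) =====
-- def Create_Experiment_Timestamp_Lines(timestamp_list, experiment_num, timestamp_num):
--     constraints = timestamp_list[experiment_num][timestamp_num]
--     if len(constraints) == 0: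
--         return ""
--     lines = [f"   {c[0]} = {c[1]}" for c in constraints if c != None]
--     header = f"$Restriction_{experiment_num + 1}_{timestamp_num + 1} :=\n" + "{\n\n"
--     return header + " and\n".join(lines) + "\n\n};\n\n"
-- ===== Notes on version B (the rewrite author's own statement) =====
-- stated objective: simpler
-- what changed: B replaces A's none_counter pass, index loop over range(len-1), last-element special case and the [:-5] back-slice repair by one comprehension of formatted lines and a single ' and\n'.join.
import Mathlib
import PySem

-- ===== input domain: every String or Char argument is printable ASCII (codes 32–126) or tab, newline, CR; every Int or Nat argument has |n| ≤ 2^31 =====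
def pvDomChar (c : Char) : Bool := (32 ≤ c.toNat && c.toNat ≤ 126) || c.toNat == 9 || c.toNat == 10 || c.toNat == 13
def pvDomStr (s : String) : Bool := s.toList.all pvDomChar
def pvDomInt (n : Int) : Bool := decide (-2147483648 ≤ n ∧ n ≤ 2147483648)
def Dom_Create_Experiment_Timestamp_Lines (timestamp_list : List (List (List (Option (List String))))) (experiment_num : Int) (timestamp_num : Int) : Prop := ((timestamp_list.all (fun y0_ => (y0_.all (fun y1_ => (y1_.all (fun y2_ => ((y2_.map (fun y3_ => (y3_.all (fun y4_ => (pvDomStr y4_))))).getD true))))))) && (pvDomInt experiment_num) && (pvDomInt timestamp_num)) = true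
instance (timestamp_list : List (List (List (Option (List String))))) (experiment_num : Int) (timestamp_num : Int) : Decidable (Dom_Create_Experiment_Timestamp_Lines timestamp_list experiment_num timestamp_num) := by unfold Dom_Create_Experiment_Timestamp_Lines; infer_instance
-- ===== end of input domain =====

-- B replaces A's index loop, none_counter and the [:-5] back-slice by one comprehension
-- plus a single " and\n".join (objective: simpler).

-- ===== PORT A =====
-- f"   {c[0]} = {c[1]}"
def pvFmtA (c : List String) : String :=
  "   " ++ PySem.List.pyGetD c 0 "" ++ " = " ++ PySem.List.pyGetD c 1 ""

def Create_Experiment_Timestamp_Lines (timestamp_list : List (List (List (Option (List String))))) (experiment_num : Int) (timestamp_num : Int) : String :=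
  let constraints := PySem.List.pyGetD (PySem.List.pyGetD timestamp_list experiment_num []) timestamp_num []
  if constraints.length = 0 then "" else
  let none_counter : Int :=
    constraints.foldl (fun acc e => if e == none then acc + 1 else acc) 0
  let restriction :=
    "$Restriction_" ++ PySem.Int.toStr (experiment_num + 1) ++ "_" ++
      PySem.Int.toStr (timestamp_num + 1) ++ " :=\n" ++ "{\n\n"
  let restriction :=
    if (constraints.length : Int) ≠ 1 then
      (PySem.List.pyRange 0 ((constraints.length : Int) - 1) 1).foldl
        (fun r i =>
          match PySem.List.pyGetD constraints i none with
          | some c => r ++ pvFmtA c ++ " and\n"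
          | none => r)
        restriction
    else restriction
  match PySem.List.pyGetD constraints (-1) none with
  | some c => restriction ++ pvFmtA c ++ "\n\n};\n\n"
  | none =>
    if none_counter ≠ (constraints.length : Int) then
      PySem.Str.slice restriction none (some (-5)) ++ "\n\n};\n\n"
    else
      restriction ++ "\n\n};\n\n"

-- ===== PORT B =====
def Create_Experiment_Timestamp_Lines_alt (timestamp_list : List (List (List (Option (List String))))) (experiment_num : Int) (timestamp_num : Int) : String :=
  let constraints := PySem.List.pyGetD (PySem.List.pyGetD timestamp_list experiment_num []) timestamp_num []
  if constraints.length = 0 then "" else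
  let lines := constraints.filterMap (fun c =>
    c.map (fun l => "   " ++ PySem.List.pyGetD l 0 "" ++ " = " ++ PySem.List.pyGetD l 1 ""))
  let header :=
    "$Restriction_" ++ PySem.Int.toStr (experiment_num + 1) ++ "_" ++
      PySem.Int.toStr (timestamp_num + 1) ++ " :=\n" ++ "{\n\n"
  header ++ PySem.Str.join " and\n" lines ++ "\n\n};\n\n"

-- ===== PRECONDITION & SPEC =====
-- Pre_ excludes exactly the inputs where the Python A raises: an out-of-range experiment/timestamp
-- index (IndexError) or a non-None constraint with fewer than 2 entries (IndexError in the f-string).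
def Pre_Create_Experiment_Timestamp_Lines (timestamp_list : List (List (List (Option (List String))))) (experiment_num : Int) (timestamp_num : Int) : Prop :=
  PySem.Raise.InRange timestamp_list.length experiment_num ∧
  PySem.Raise.InRange (PySem.List.pyGetD timestamp_list experiment_num []).length timestamp_num ∧
  ∀ c ∈ PySem.List.pyGetD (PySem.List.pyGetD timestamp_list experiment_num []) timestamp_num [],
    ∀ l ∈ c, 2 ≤ l.length
instance (timestamp_list : List (List (List (Option (List String))))) (experiment_num : Int) (timestamp_num : Int) : Decidable (Pre_Create_Experiment_Timestamp_Lines timestamp_list experiment_num timestamp_num) := by unfold Pre_Create_Experiment_Timestamp_Lines; infer_instance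

def pvWitness_Create_Experiment_Timestamp_Lines : List (List (List (Option (List String)))) × Int × Int :=
  ([[[some ["a", "1"], none, some ["b", "2"]]]], 0, 0)

def Spec_Create_Experiment_Timestamp_Lines (timestamp_list : List (List (List (Option (List String))))) (experiment_num : Int) (timestamp_num : Int) (out : String) : Prop := out = Create_Experiment_Timestamp_Lines_alt timestamp_list experiment_num timestamp_num
instance (timestamp_list : List (List (List (Option (List String))))) (experiment_num : Int) (timestamp_num : Int) (out : String) : Decidable (Spec_Create_Experiment_Timestamp_Lines timestamp_list experiment_num timestamp_num out) := by unfold Spec_Create_Experiment_Timestamp_Lines; infer_instance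

-- ===== CLAIM (what is proved, stated in full; the proofs are below) =====
def Claim_equal_Create_Experiment_Timestamp_Lines : Prop := ∀ (timestamp_list : List (List (List (Option (List String))))) (experiment_num : Int) (timestamp_num : Int), Dom_Create_Experiment_Timestamp_Lines timestamp_list experiment_num timestamp_num → Pre_Create_Experiment_Timestamp_Lines timestamp_list experiment_num timestamp_num → Spec_Create_Experiment_Timestamp_Lines timestamp_list experiment_num timestamp_num (Create_Experiment_Timestamp_Lines timestamp_list experiment_num timestamp_num)

-- ===== LEMMAS AND PROOFS =====

-- the lines B collects
def pvLines (cs : List (Option (List String))) : List String :=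
  cs.filterMap (fun c =>
    c.map (fun l => "   " ++ PySem.List.pyGetD l 0 "" ++ " = " ++ PySem.List.pyGetD l 1 ""))

-- plain concatenation of a list of strings
def pvCat : List String → String
  | [] => ""
  | x :: xs => x ++ pvCat xs

theorem pvLines_eq (cs : List (Option (List String))) :
    pvLines cs = cs.filterMap (fun c => c.map pvFmtA) := rfl

-- A's prefix loop appends the " and\n"-terminated lines one after the other
theorem pvLoopA (cs : List (Option (List String))) (r : String) :
    cs.foldl (fun r e =>
        match e with
        | some c => r ++ pvFmtA c ++ " and\n"
        | none => r) r
      = r ++ pvCat ((pvLines cs).map (· ++ " and\n")) := by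
  induction cs generalizing r with
  | nil => simp [pvLines, pvCat]
  | cons x xs ih =>
    cases x with
    | none =>
      simp only [List.foldl_cons, ih]
      simp [pvLines]
    | some c =>
      simp only [List.foldl_cons, ih]
      simp [pvLines, pvCat, pvFmtA, String.append_assoc]

theorem pvCharsJoin_snoc (sep : List Char) (xs : List (List Char)) (y : List Char) :
    PySem.Chars.join sep (xs ++ [y]) = ((xs.map (· ++ sep)).flatten) ++ y := by
  induction xs with
  | nil => simp [PySem.Chars.join_singleton]
  | cons a xs ih =>
    cases xs with
    | nil => simp [PySem.Chars.join_cons_cons, PySem.Chars.join_singleton]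
    | cons b zs =>
      simp only [List.cons_append] at ih ⊢
      rw [PySem.Chars.join_cons_cons, ih]
      simp

theorem pvCharsFlat_nonempty (sep : List Char) (xs : List (List Char)) (h : xs ≠ []) :
    (xs.map (· ++ sep)).flatten = PySem.Chars.join sep xs ++ sep := by
  induction xs with
  | nil => exact absurd rfl h
  | cons a xs ih =>
    cases xs with
    | nil => simp [PySem.Chars.join_singleton]
    | cons b zs =>
      rw [PySem.Chars.join_cons_cons, List.map_cons, List.flatten_cons, ih (by simp)]
      simp [List.append_assoc]

theorem pvCat_toList (xs : List String) :
    (pvCat xs).toList = (xs.map String.toList).flatten := by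
  induction xs with
  | nil => simp [pvCat]
  | cons a xs ih => simp [pvCat, ih]

theorem pvJoin_snoc (xs : List String) (y : String) :
    PySem.Str.join " and\n" (xs ++ [y])
      = pvCat (xs.map (· ++ " and\n")) ++ y := by
  apply String.toList_inj.mp
  simp only [String.toList_append, PySem.Str.toList_join, pvCat_toList, List.map_append,
    List.map_map, List.map_cons, List.map_nil]
  rw [pvCharsJoin_snoc]
  simp [Function.comp_def]

theorem pvCat_nonempty (xs : List String) (h : xs ≠ []) :
    pvCat (xs.map (· ++ " and\n")) = PySem.Str.join " and\n" xs ++ " and\n" := by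
  apply String.toList_inj.mp
  simp only [String.toList_append, PySem.Str.toList_join, pvCat_toList, List.map_map]
  have hmm : (List.map (String.toList ∘ fun x => x ++ " and\n") xs)
      = (xs.map String.toList).map (· ++ (" and\n").toList) := by
    simp [Function.comp_def]
  rw [hmm, pvCharsFlat_nonempty _ _ (by simpa using h)]

-- dropping the last 5 characters removes one trailing " and\n"
theorem pvSliceDrop5 (s : String) :
    PySem.Str.slice (s ++ " and\n") none (some (-5)) = s := by
  apply String.toList_inj.mp
  rw [PySem.Str.toList_slice, PySem.Chars.slice_eq_listSlice,
    PySem.List.slice_to_neg_ofNat _ 5 (by omega)]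
  simp only [String.toList_append]
  have hl : (s.toList ++ (" and\n").toList).length - 5 = s.toList.length := by simp
  rw [hl]
  exact List.take_left

-- the loop over range(len(cs)-1) is the loop over cs.dropLast
theorem pvRangeLoop (cs : List (Option (List String))) (r : String) :
    (PySem.List.pyRange 0 ((cs.length : Int) - 1) 1).foldl
        (fun r i =>
          match PySem.List.pyGetD cs i none with
          | some c => r ++ pvFmtA c ++ " and\n"
          | none => r) r
      = r ++ pvCat ((pvLines cs.dropLast).map (· ++ " and\n")) := by
  rcases List.eq_nil_or_concat cs with h | ⟨pre, x, h⟩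
  · subst h; simp [PySem.List.pyRange, pvLines, pvCat]
  · have hlen : ((cs.length : Int) - 1) = (cs.dropLast.length : Int) := by
      subst h; simp
    rw [hlen]
    rw [PySem.List.foldl_congr_mem _ _
      (fun r i =>
          match PySem.List.pyGetD cs.dropLast i none with
          | some c => r ++ pvFmtA c ++ " and\n"
          | none => r) _ ?_]
    · rw [← pvLoopA cs.dropLast r]
      exact PySem.List.foldl_pyRange_pyGetD' cs.dropLast none
        (fun (r : String) (e : Option (List String)) =>
          match e with
          | some c => r ++ pvFmtA c ++ " and\n"
          | none => r) r (a := 0) le_rfl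
    · intro acc i hi
      rw [PySem.List.mem_pyRange_one] at hi
      have h0 : (0:Int) ≤ i := hi.1
      have h1 : i < (cs.dropLast.length : Int) := hi.2
      have e1 : PySem.List.pyGetD cs i none = cs[i.toNat]'(by
            subst h; simp at h1 ⊢; omega) :=
        PySem.List.pyGetD_eq_getElem cs none h0 (by subst h; simp at h1 ⊢; omega)
      have e2 : PySem.List.pyGetD cs.dropLast i none = cs[i.toNat]'(by
            subst h; simp at h1 ⊢; omega) := by
        rw [PySem.List.pyGetD_eq_getElem cs.dropLast none h0 (by exact_mod_cast h1),
          List.getElem_dropLast]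
      simp only [e1, e2]

theorem pvNoneCount (cs : List (Option (List String))) :
    (cs.foldl (fun acc e => if e == none then acc + 1 else acc) (0:Int)) = (cs.length : Int)
      ↔ pvLines cs = [] := by
  rw [PySem.List.foldl_count_if]
  simp only [zero_add, pvLines, List.filterMap_eq_nil_iff]
  constructor
  · intro h c hc
    have := List.countP_eq_length.mp (by exact_mod_cast h) c hc
    cases c <;> simp_all
  · intro h
    have : List.countP (fun e => e == none) cs = cs.length := by
      apply List.countP_eq_length.mpr
      intro c hc
      have := h c hc
      cases c <;> simp_all
    exact_mod_cast this

-- the whole computation after the empty guard, for nonempty cs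
theorem pvMain (cs : List (Option (List String))) (hdr : String) (hne : cs ≠ []) :
    (match PySem.List.pyGetD cs (-1) none with
      | some c =>
        (if (cs.length : Int) ≠ 1 then
          (PySem.List.pyRange 0 ((cs.length : Int) - 1) 1).foldl
            (fun r i =>
              match PySem.List.pyGetD cs i none with
              | some c => r ++ pvFmtA c ++ " and\n"
              | none => r) hdr
        else hdr) ++ pvFmtA c ++ "\n\n};\n\n"
      | none =>
        if (cs.foldl (fun acc e => if e == none then acc + 1 else acc) (0:Int)) ≠ (cs.length : Int) then
          PySem.Str.slice
            (if (cs.length : Int) ≠ 1 then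
              (PySem.List.pyRange 0 ((cs.length : Int) - 1) 1).foldl
                (fun r i =>
                  match PySem.List.pyGetD cs i none with
                  | some c => r ++ pvFmtA c ++ " and\n"
                  | none => r) hdr
            else hdr) none (some (-5)) ++ "\n\n};\n\n"
        else
          (if (cs.length : Int) ≠ 1 then
            (PySem.List.pyRange 0 ((cs.length : Int) - 1) 1).foldl
              (fun r i =>
                match PySem.List.pyGetD cs i none with
                | some c => r ++ pvFmtA c ++ " and\n"
                | none => r) hdr
          else hdr) ++ "\n\n};\n\n")
      = hdr ++ PySem.Str.join " and\n" (pvLines cs) ++ "\n\n};\n\n" := by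
  have hloop :
      (if (cs.length : Int) ≠ 1 then
        (PySem.List.pyRange 0 ((cs.length : Int) - 1) 1).foldl
          (fun r i =>
            match PySem.List.pyGetD cs i none with
            | some c => r ++ pvFmtA c ++ " and\n"
            | none => r) hdr
      else hdr)
      = hdr ++ pvCat ((pvLines cs.dropLast).map (· ++ " and\n")) := by
    split
    · exact pvRangeLoop cs hdr
    · rename_i h1
      have hlen1 : cs.length = 1 := by
        have := not_not.mp h1; exact_mod_cast this
      have hdl0 : cs.dropLast = [] := by
        rcases cs with _ | ⟨a, _ | ⟨b, l⟩⟩ <;> simp_all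
      simp [hdl0, pvLines, pvCat]
  rw [hloop, PySem.List.pyGetD_neg_one cs none hne]
  obtain ⟨pre, x, h⟩ := (List.eq_nil_or_concat cs).resolve_left hne
  rw [List.concat_eq_append] at h
  subst h
  have hgl : (pre ++ [x]).getLast hne = x := by simp
  have hdl : (pre ++ [x]).dropLast = pre := by simp
  rw [hgl, hdl]
  cases x with
  | some c =>
    have hlines : pvLines (pre ++ [some c]) = pvLines pre ++ [pvFmtA c] := by
      simp only [pvLines_eq, List.filterMap_append, List.filterMap_cons, Option.map_some,
        List.filterMap_nil]
    rw [hlines, pvJoin_snoc]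
    simp [String.append_assoc]
  | none =>
    have hlines : pvLines (pre ++ [none]) = pvLines pre := by
      simp only [pvLines_eq, List.filterMap_append, List.filterMap_cons, Option.map_none,
        List.filterMap_nil, List.append_nil]
    split
    · rename_i c hcnt
      cases hcnt
    · split
      · rename_i hcnt
        have hpre : pvLines pre ≠ [] := by
          intro hp
          exact hcnt ((pvNoneCount (pre ++ [none])).mpr (by rw [hlines]; exact hp))
        rw [pvCat_nonempty _ hpre, ← String.append_assoc, pvSliceDrop5, hlines]
      · rename_i hcnt
        have hempty : pvLines (pre ++ [none]) = [] := (pvNoneCount (pre ++ [none])).mp (not_not.mp hcnt)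
        have hempty' : pvLines pre = [] := by rw [← hlines]; exact hempty
        rw [hlines, hempty']
        apply String.toList_inj.mp
        simp [pvCat]

-- ===== VERDICT (by name: the statement is the Claim_ definition above) =====
theorem Create_Experiment_Timestamp_Lines_spec : Claim_equal_Create_Experiment_Timestamp_Lines := by
  intro tl en tn _ _
  unfold Spec_Create_Experiment_Timestamp_Lines
  unfold Create_Experiment_Timestamp_Lines Create_Experiment_Timestamp_Lines_alt
  by_cases hnil : (PySem.List.pyGetD (PySem.List.pyGetD tl en []) tn []).length = 0
  · simp only [if_pos hnil]
  · simp only [if_neg hnil]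
    have hne : PySem.List.pyGetD (PySem.List.pyGetD tl en []) tn [] ≠ [] := by
      intro h; exact hnil (by simp [h])
    exact pvMain _ _ hne
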